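-- pv_equiv track=rewrite | github.com/josh5734/Programmers-PS | Programmers_괄호변환.py | isBalancedBucket
-- ===== SOURCE A (Python) =====
-- def isBalancedBucket(p):
--     if len(p) == 0:
--         return True
--     left, right = 0, 0
--     for b in p:
--         if b == '(':
--             left += 1
--         elif b == ')':
--             right += 1
--
--         if left == right:
--             return True
--     return False
-- ===== SOURCE B (Python) =====
-- def isBalancedBucket(p):
--     if not p:
--         return True
--     delta = {'(': 1, ')': -1}
--     total = sum(delta.get(c, 0) for c in p)
--     found = False
--     t = 0
--     for c in reversed(p):
--         found = found or t == total
--         t += delta.get(c, 0)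
--     return found
-- ===== Notes on version B (the rewrite author's own statement) =====
-- stated objective: alternative
-- what changed: Two staged passes instead of A's single forward two-counter scan with early return: first compute the string's total bracket balance, then walk the string back-to-front accumulating suffix balances and test whether some suffix balance equals the total (a nonempty prefix balances iff its complementary suffix carries the whole total).
import Mathlib
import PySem

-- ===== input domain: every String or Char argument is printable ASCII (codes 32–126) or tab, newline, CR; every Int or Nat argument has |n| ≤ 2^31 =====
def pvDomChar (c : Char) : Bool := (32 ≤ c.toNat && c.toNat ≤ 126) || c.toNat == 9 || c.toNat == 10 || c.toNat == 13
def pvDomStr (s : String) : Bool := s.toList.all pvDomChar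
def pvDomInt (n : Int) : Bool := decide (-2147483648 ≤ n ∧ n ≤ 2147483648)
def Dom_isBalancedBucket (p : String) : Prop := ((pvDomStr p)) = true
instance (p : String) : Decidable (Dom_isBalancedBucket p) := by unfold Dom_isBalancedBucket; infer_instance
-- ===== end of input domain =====

-- B replaces A's single forward two-counter scan with early return by two staged passes:
-- total balance first, then a back-to-front scan of suffix balances tested against the
-- total (alternative decomposition; same cost).

-- ===== PORT A =====
-- A's for-loop with early return: structural recursion carrying the two counters.
def pvALoop : List Char → Int → Int → Bool
  | [], _, _ => false
  | b :: rest, left, right =>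
    let left' := if b = '(' then left + 1 else left
    let right' := if b ≠ '(' ∧ b = ')' then right + 1 else right
    if left' = right' then true else pvALoop rest left' right'

def isBalancedBucket (p : String) : Bool :=
  if p.toList.length = 0 then true
  else pvALoop p.toList 0 0

-- ===== PORT B =====
-- delta.get(c, 0)
def pvDelta (c : Char) : Int := if c = '(' then 1 else if c = ')' then -1 else 0

-- B's second pass over reversed(p): running suffix balance t, flag found.
def pvBLoop : List Char → Int → Int → Bool → Bool
  | [], _, _, found => found
  | c :: rest, total, t, found => pvBLoop rest total (t + pvDelta c) (found || (t == total))

def isBalancedBucket_alt (p : String) : Bool :=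
  if p.toList = [] then true
  else pvBLoop p.toList.reverse ((p.toList.map pvDelta).sum) 0 false

-- ===== PRECONDITION & SPEC =====
def Spec_isBalancedBucket (p : String) (out : Bool) : Prop := out = isBalancedBucket_alt p
instance (p : String) (out : Bool) : Decidable (Spec_isBalancedBucket p out) := by unfold Spec_isBalancedBucket; infer_instance

-- ===== CLAIM (what is proved, stated in full; the proofs are below) =====
def Claim_equal_isBalancedBucket : Prop := ∀ (p : String), Dom_isBalancedBucket p → Spec_isBalancedBucket p (isBalancedBucket p)

-- ===== LEMMAS AND PROOFS =====

-- Prefix sums of the net balance (proof helper, not part of either port).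
def pvScan : List Char → Int → List Int
  | [], _ => []
  | c :: rest, t => (t + pvDelta c) :: pvScan rest (t + pvDelta c)

-- The states B's loop tests (value of t before each step).
def pvChecked : List Char → Int → List Int
  | [], _ => []
  | c :: rest, t => t :: pvChecked rest (t + pvDelta c)

-- A's loop = "0 occurs among the prefix balances".
theorem pvALoop_eq (cs : List Char) : ∀ left right : Int,
    pvALoop cs left right = (pvScan cs (left - right)).contains 0 := by
  induction cs with
  | nil => intro l r; simp [pvALoop, pvScan]
  | cons c rest ih =>
    intro l r
    have key : ∀ l' r' : Int, l' - r' = l - r + pvDelta c →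
        (if l' = r' then true else pvALoop rest l' r') =
          ((l - r + pvDelta c) :: pvScan rest (l - r + pvDelta c)).contains 0 := by
      intro l' r' hd
      by_cases hz : l' = r'
      · have h0 : l - r + pvDelta c = 0 := by rw [← hd, hz]; ring
        simp [hz, h0]
      · have h0 : l - r + pvDelta c ≠ 0 := by rw [← hd]; omega
        rw [if_neg hz, ih l' r', hd]
        simp [Ne.symm h0]
    simp only [pvALoop, pvScan]
    refine key _ _ ?_
    by_cases hp : c = '('
    · simp [hp, pvDelta]; ring
    · by_cases hq : c = ')'
      · simp [hq, pvDelta]; ring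
      · simp [hp, hq, pvDelta]

-- B's loop = "total occurs among the tested states".
theorem pvBLoop_eq (ys : List Char) : ∀ total t found,
    pvBLoop ys total t found = (found || (pvChecked ys t).contains total) := by
  induction ys with
  | nil => intro T t f; simp [pvBLoop, pvChecked]
  | cons c rest ih =>
    intro T t f
    simp only [pvBLoop, pvChecked, ih, List.contains_cons]
    by_cases h : t = T
    · simp [h]
    · have e1 : (t == T) = false := by rw [beq_eq_false_iff_ne]; exact h
      have e2 : (T == t) = false := by rw [beq_eq_false_iff_ne]; exact Ne.symm h
      rw [e1, e2]
      simp

-- Shifting the start shifts every tested state.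
theorem pvChecked_shift (ys : List Char) : ∀ t s : Int,
    pvChecked ys (t + s) = (pvChecked ys t).map (· + s) := by
  induction ys with
  | nil => intro t s; simp [pvChecked]
  | cons c rest ih =>
    intro t s
    simp only [pvChecked, List.map_cons]
    congr 1
    have h : t + s + pvDelta c = (t + pvDelta c) + s := by ring
    rw [h, ih]

-- Appending one char appends one prefix sum.
theorem pvScan_append (cs : List Char) : ∀ c t,
    pvScan (cs ++ [c]) t = pvScan cs t ++ [t + (cs.map pvDelta).sum + pvDelta c] := by
  induction cs with
  | nil => intro c t; simp [pvScan]
  | cons d rest ih =>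
    intro c t
    have h : t + pvDelta d + (List.map pvDelta rest).sum + pvDelta c
        = t + (pvDelta d + (List.map pvDelta rest).sum) + pvDelta c := by ring
    simp only [List.cons_append, pvScan, ih, h, List.map_cons, List.sum_cons]

-- Core: total among B's back-to-front states ↔ 0 among the prefix balances.
theorem contains_map_add (L : List Int) (S d : Int) :
    (L.map (· + d)).contains (S + d) = L.contains S := by
  induction L with
  | nil => simp
  | cons x xs ih =>
    simp only [List.map_cons, List.contains_cons, ih]
    by_cases h : S = x
    · simp [h]
    · have h2 : S + d ≠ x + d := by omega
      have e1 : (S + d == x + d) = false := by rw [beq_eq_false_iff_ne]; exact h2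
      have e2 : (S == x) = false := by rw [beq_eq_false_iff_ne]; exact h
      rw [e1, e2]

theorem pvChecked_reverse (cs : List Char) :
    (pvChecked cs.reverse 0).contains ((cs.map pvDelta).sum)
      = (pvScan cs 0).contains 0 := by
  induction cs using List.reverseRecOn with
  | nil => simp [pvChecked, pvScan]
  | append_singleton ds c ih =>
    have h1 : (ds ++ [c]).reverse = c :: ds.reverse := by simp
    have hT : ((ds ++ [c]).map pvDelta).sum = (ds.map pvDelta).sum + pvDelta c := by simp
    rw [h1, hT, pvScan_append]
    have h2 : pvChecked (c :: ds.reverse) 0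
        = 0 :: (pvChecked ds.reverse 0).map (· + pvDelta c) := by
      rw [pvChecked, pvChecked_shift]
    rw [h2]
    simp only [List.contains_cons, List.contains_append, List.contains_nil, Bool.or_false]
    rw [contains_map_add, ih]
    have e : (((ds.map pvDelta).sum + pvDelta c) == (0:Int))
        = ((0:Int) == 0 + (ds.map pvDelta).sum + pvDelta c) := by
      by_cases h : (ds.map pvDelta).sum + pvDelta c = 0
      · have e1 : (((ds.map pvDelta).sum + pvDelta c) == (0:Int)) = true := by
          rw [beq_iff_eq]; exact h
        have e2 : ((0:Int) == 0 + (ds.map pvDelta).sum + pvDelta c) = true := by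
          rw [beq_iff_eq]; omega
        rw [e1, e2]
      · have e1 : (((ds.map pvDelta).sum + pvDelta c) == (0:Int)) = false := by
          rw [beq_eq_false_iff_ne]; exact h
        have e2 : ((0:Int) == 0 + (ds.map pvDelta).sum + pvDelta c) = false := by
          rw [beq_eq_false_iff_ne]; intro hh; omega
        rw [e1, e2]
    rw [e, Bool.or_comm]

-- ===== VERDICT (by name: the statement is the Claim_ definition above) =====
theorem isBalancedBucket_spec : Claim_equal_isBalancedBucket := by
  intro p _
  unfold Spec_isBalancedBucket isBalancedBucket isBalancedBucket_alt
  cases h : p.toList with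
  | nil => simp
  | cons c rest =>
    rw [if_neg (by simp), if_neg (by simp)]
    rw [pvALoop_eq (c :: rest) 0 0, pvBLoop_eq]
    have h00 : (0:Int) - 0 = 0 := by ring
    rw [h00, ← pvChecked_reverse, Bool.false_or]
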